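-- pv_equiv track=rewrite | github.com/Mmiglio/BiologicalData | code/part2/enrichment_functions.py | get_ancestors_go
-- ===== SOURCE A (Python) =====
-- def get_ancestors_go(nodes, parents):
--     """
--     Compute the list of ancestors for each node
--     """
--     ancestors = {}  # { term : list_of_ancestor_terms }
--     for node in nodes:
--         node_ancestors = []
--         node_parents = parents.get(node)
--         # Loop parent levels until no more parents
--         while node_parents:
--             node_ancestors.extend(node_parents)
--             # Get the parents of current parents (1 level up)
--             node_parents = [term for parent in node_parents for term in parents.get(parent, [])]
--         ancestors[node] = node_ancestors
--     return ancestors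
-- ===== SOURCE B (Python) =====
-- def get_ancestors_go(nodes, parents):
--     """
--     Compute the list of ancestors for each node (queue-based BFS: the
--     growing queue itself, scanned by an index, IS the ancestor list).
--     """
--     ancestors = {}
--     for node in nodes:
--         queue = list(parents.get(node) or [])
--         i = 0
--         # Pop from the front by advancing i; push parents on the back.
--         while i < len(queue):
--             queue.extend(parents.get(queue[i], []))
--             i += 1
--         ancestors[node] = queue
--     return ancestors
-- ===== Notes on version B (the rewrite author's own statement) =====
-- stated objective: idiomatic
-- what changed: Replaces the level-batch expansion (rebuild the whole next level with a nested comprehension each round) by a classic single-queue BFS: one growing list scanned by an index, where each popped term pushes its own parents; the queue itself becomes the ancestor list.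
import Mathlib
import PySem

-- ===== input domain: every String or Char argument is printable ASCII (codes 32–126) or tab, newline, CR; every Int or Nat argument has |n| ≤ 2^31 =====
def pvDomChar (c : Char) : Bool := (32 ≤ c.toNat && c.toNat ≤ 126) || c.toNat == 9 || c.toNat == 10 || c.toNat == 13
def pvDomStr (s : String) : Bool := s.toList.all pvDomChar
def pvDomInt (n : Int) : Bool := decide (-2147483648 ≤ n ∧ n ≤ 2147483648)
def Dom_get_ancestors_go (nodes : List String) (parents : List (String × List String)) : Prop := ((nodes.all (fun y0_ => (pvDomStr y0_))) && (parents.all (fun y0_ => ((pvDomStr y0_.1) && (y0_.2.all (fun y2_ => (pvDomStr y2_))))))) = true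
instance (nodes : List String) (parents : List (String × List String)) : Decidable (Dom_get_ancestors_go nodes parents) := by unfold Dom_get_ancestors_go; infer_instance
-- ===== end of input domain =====

-- B replaces A's level-batch expansion by a single-queue BFS (the queue itself becomes the
-- ancestor list); same output, stated on the inputs where A's while-loop terminates (Pre_).

-- shared one-line lookup: parents.get(x, []) (also what `parents.get(x)` feeds the loop:
-- None and a stored [] both end/skip the loop at once, exactly like [])
def pvNxt (parents : List (String × List String)) (x : String) : List String :=
  ((PySem.Dict.mk parents).get? x).getD []

-- ===== PORT A =====
-- A's inner comprehension: one whole level up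
def pvStep (parents : List (String × List String)) (L : List String) : List String :=
  L.flatMap (pvNxt parents)

-- A's while-loop over levels; the fuel only makes the loop total: under Pre_ the level
-- list is empty after at most parents.length + 1 rounds, so the fuel is never exhausted
def pvLevels (parents : List (String × List String)) : Nat → List String → List String
  | 0, _ => []
  | f + 1, L => if L = [] then [] else L ++ pvLevels parents f (pvStep parents L)

def get_ancestors_go (nodes : List String) (parents : List (String × List String)) : List (String × List String) :=
  (nodes.foldl (fun ancestors node =>
      -- node_parents = parents.get(node)
      let node_parents := ((PySem.Dict.mk parents).get? node).getD []
      PySem.Dict.insert ancestors node (pvLevels parents (parents.length + 1) node_parents))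
    PySem.Dict.empty).items

-- ===== PORT B =====
-- total size of all parent lists; bounds the branching of one BFS pop
def pvD (parents : List (String × List String)) : Nat :=
  (parents.map (fun p => p.2.length)).sum

-- fuel = upper bound on the number of pops under Pre_ (≥ the whole BFS output length);
-- it only makes the loop total and is never exhausted on Pre_ inputs
def pvFuelB (parents : List (String × List String)) : Nat :=
  pvD parents * (pvD parents + 1) ^ (parents.length + 1)

-- Source B's queue loop: the element at the scan index is popped (kept in the output) and
-- its parents are pushed on the back; the fully scanned queue is the ancestor list
def pvQueue (parents : List (String × List String)) : Nat → List String → List String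
  | 0, _ => []
  | _ + 1, [] => []
  | f + 1, t :: rest => t :: pvQueue parents f (rest ++ pvNxt parents t)

def get_ancestors_go_alt (nodes : List String) (parents : List (String × List String)) : List (String × List String) :=
  (nodes.foldl (fun ancestors node =>
      -- queue = list(parents.get(node) or [])
      PySem.Dict.insert ancestors node
        (pvQueue parents (pvFuelB parents) (((PySem.Dict.mk parents).get? node).getD [])))
    PySem.Dict.empty).items

-- ===== PRECONDITION & SPEC =====
-- pvReach parents n S = every term reachable from the set S in at most n edge steps of the
-- parents graph (cumulative, deduplicated closure — a plain graph-reachability operator)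
def pvReach (parents : List (String × List String)) : Nat → List String → List String
  | 0, S => S.dedup
  | n + 1, S =>
      (pvReach parents n S ++ (pvReach parents n S).flatMap (pvNxt parents)).dedup

-- Pre_: the parents graph restricted to terms reachable from a queried node is acyclic
-- (no term k reachable from some node ∈ nodes lies on a directed cycle).  This is exactly
-- the set of inputs on which the Python A returns: on a cycle reachable from a queried
-- node its while-loop never terminates.  parents.length + 1 steps saturate reachability
-- (pigeonhole on the keys of parents), so the bound is no size restriction.
def Pre_get_ancestors_go (nodes : List String) (parents : List (String × List String)) : Prop :=
  ∀ node ∈ nodes,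
    ∀ k ∈ pvReach parents (parents.length + 1) (((PySem.Dict.mk parents).get? node).getD []),
      k ∉ pvReach parents (parents.length + 1) (pvNxt parents k)
instance (nodes : List String) (parents : List (String × List String)) : Decidable (Pre_get_ancestors_go nodes parents) := by unfold Pre_get_ancestors_go; infer_instance

def pvWitness_get_ancestors_go : List String × (List (String × List String)) :=
  (["a", "c"], [("a", ["b", "b"]), ("b", [])])

def Spec_get_ancestors_go (nodes : List String) (parents : List (String × List String)) (out : List (String × List String)) : Prop := out = get_ancestors_go_alt nodes parents
instance (nodes : List String) (parents : List (String × List String)) (out : List (String × List String)) : Decidable (Spec_get_ancestors_go nodes parents out) := by unfold Spec_get_ancestors_go; infer_instance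

-- ===== CLAIM (what is proved, stated in full; the proofs are below) =====
def Claim_equal_get_ancestors_go : Prop := ∀ (nodes : List String) (parents : List (String × List String)), Dom_get_ancestors_go nodes parents → Pre_get_ancestors_go nodes parents → Spec_get_ancestors_go nodes parents (get_ancestors_go nodes parents)

-- ===== LEMMAS AND PROOFS =====

-- proof-side mirror of A's loop state: the level list after exactly m rounds
def pvIter (parents : List (String × List String)) : Nat → List String → List String
  | 0, L => L
  | m + 1, L => pvStep parents (pvIter parents m L)

lemma pv_iter_succ_inner (parents : List (String × List String)) :
    ∀ (m : Nat) (L : List String), pvIter parents (m + 1) L = pvIter parents m (pvStep parents L)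
  | 0, L => rfl
  | m + 1, L => by
      show pvStep parents (pvIter parents (m + 1) L) = _
      rw [pv_iter_succ_inner parents m L]; rfl

-- membership in the reachability closure = membership in some level ≤ n
lemma pv_mem_reach (parents : List (String × List String)) :
    ∀ (n : Nat) (S : List String) (y : String),
      y ∈ pvReach parents n S ↔ ∃ m ≤ n, y ∈ pvIter parents m S := by
  intro n
  induction n with
  | zero =>
      intro S y
      simp only [pvReach, List.mem_dedup]
      constructor
      · intro h; exact ⟨0, le_refl 0, h⟩
      · rintro ⟨m, hm, h⟩; interval_cases m; exact h
  | succ n ih =>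
      intro S y
      simp only [pvReach, List.mem_dedup, List.mem_append, List.mem_flatMap]
      constructor
      · rintro (h | ⟨x, hx, hyx⟩)
        · obtain ⟨m, hm, h⟩ := (ih S y).mp h
          exact ⟨m, by omega, h⟩
        · obtain ⟨m, hm, hx'⟩ := (ih S x).mp hx
          exact ⟨m + 1, by omega, List.mem_flatMap.mpr ⟨x, hx', hyx⟩⟩
      · rintro ⟨m, hm, h⟩
        by_cases hmn : m ≤ n
        · exact Or.inl ((ih S y).mpr ⟨m, hmn, h⟩)
        · have : m = n + 1 := by omega
          subst this
          obtain ⟨x, hx, hyx⟩ := List.mem_flatMap.mp h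
          exact Or.inr ⟨x, (ih S x).mpr ⟨n, le_refl n, hx⟩, hyx⟩

lemma pv_key_of_mem_nxt (parents : List (String × List String)) {a b : String}
    (hb : b ∈ pvNxt parents a) : a ∈ parents.map Prod.fst := by
  by_contra hna
  have h0 : (PySem.Dict.mk parents).get? a = none := by
    rw [PySem.Dict.get?_eq_none_iff_not_mem_keys]
    simpa [PySem.Dict.keys_mk] using hna
  simp [pvNxt, h0] at hb

lemma pv_chain_exists (parents : List (String × List String)) :
    ∀ (m : Nat) (L : List String) (y : String), y ∈ pvIter parents m L →
      ∃ vs : List String, vs.length = m + 1 ∧ vs.getLast? = some y ∧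
        (∃ h, vs.head? = some h ∧ h ∈ L) ∧ List.IsChain (fun a b => b ∈ pvNxt parents a) vs
  | 0, L, y, hy => ⟨[y], rfl, rfl, ⟨y, rfl, hy⟩, List.IsChain.singleton y⟩
  | m + 1, L, y, hy => by
      rw [pv_iter_succ_inner] at hy
      obtain ⟨vs, hlen, hlast, ⟨h, hhead, hhS⟩, hch⟩ := pv_chain_exists parents m (pvStep parents L) y hy
      obtain ⟨x, hxL, hhx⟩ := List.mem_flatMap.mp hhS
      have hvne : vs ≠ [] := by intro e; rw [e] at hhead; simp at hhead
      refine ⟨x :: vs, by simp [hlen], ?_, ⟨x, rfl, hxL⟩, ?_⟩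
      · rw [List.getLast?_cons, hlast]; simp
      · exact hch.cons (by intro b hb; rw [hhead] at hb; simp only [Option.mem_def, Option.some.injEq] at hb; exact hb ▸ hhx)

lemma pv_chain_getElem_iter (parents : List (String × List String)) (vs : List String)
    (hch : List.IsChain (fun a b => b ∈ pvNxt parents a) vs) (h : String) (L : List String)
    (hhead : vs.head? = some h) (hhL : h ∈ L) :
    ∀ (i : Nat) (hi : i < vs.length), vs[i] ∈ pvIter parents i L := by
  intro i
  induction i with
  | zero =>
      intro hi
      cases vs with
      | nil => simp at hhead
      | cons a t =>
          simp only [List.head?_cons, Option.some.injEq] at hhead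
          simpa [pvIter, hhead] using hhL
  | succ i ih =>
      intro hi
      have h1 := ih (by omega)
      have h2 := hch.getElem i (by omega)
      show vs[i + 1] ∈ pvStep parents (pvIter parents i L)
      exact List.mem_flatMap.mpr ⟨vs[i], h1, h2⟩

lemma pv_chain_shift (parents : List (String × List String)) (vs : List String)
    (hch : List.IsChain (fun a b => b ∈ pvNxt parents a) vs) (i : Nat) :
    ∀ (t : Nat) (ht : i + t < vs.length), vs[i + t] ∈ pvIter parents t [vs[i]'(by omega)] := by
  intro t
  induction t with
  | zero => intro ht; simp [pvIter]
  | succ t ih =>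
      intro ht
      have h1 := ih (by omega)
      have h2 := hch.getElem (i + t) (by omega)
      show vs[(i + t) + 1]'(by omega) ∈ pvStep parents (pvIter parents t [vs[i]'(by omega)])
      exact List.mem_flatMap.mpr ⟨vs[i + t], h1, h2⟩

-- Pre_ implies A's loop empties within parents.length + 1 rounds (pigeonhole on keys)
lemma pv_term' (nodes : List String) (parents : List (String × List String))
    (hpre : Pre_get_ancestors_go nodes parents) {node : String} (hn : node ∈ nodes) :
    pvIter parents (parents.length + 1) (pvNxt parents node) = [] := by
  by_contra hne
  obtain ⟨y, hy⟩ := List.exists_mem_of_ne_nil _ hne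
  obtain ⟨vs, hlen, _hlast, ⟨h, hhead, hhL⟩, hch⟩ :=
    pv_chain_exists parents (parents.length + 1) (pvNxt parents node) y hy
  have hlenvs : vs.length = parents.length + 2 := by omega
  have hWsub : vs.take (parents.length + 1) ⊆ (parents.map Prod.fst).dedup := by
    intro w hw
    obtain ⟨i, hi, hwi⟩ := List.mem_iff_getElem.mp hw
    have hi' : i < parents.length + 1 := by
      have := List.length_take_le (parents.length + 1) vs; omega
    rw [List.getElem_take] at hwi
    rw [List.mem_dedup, ← hwi]
    exact pv_key_of_mem_nxt parents (hch.getElem i (by omega))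
  have hWlen : (vs.take (parents.length + 1)).length = parents.length + 1 := by
    rw [List.length_take]; omega
  have hnd : ¬ (vs.take (parents.length + 1)).Nodup := by
    intro hnod
    have h1 : (vs.take (parents.length + 1)).length ≤ ((parents.map Prod.fst).dedup).length := by
      calc (vs.take (parents.length + 1)).length
          = (vs.take (parents.length + 1)).toFinset.card := (List.toFinset_card_of_nodup hnod).symm
        _ ≤ ((parents.map Prod.fst).dedup).toFinset.card := Finset.card_le_card (fun x hx => by
              simp only [List.mem_toFinset] at *; exact hWsub hx)
        _ ≤ ((parents.map Prod.fst).dedup).length := List.toFinset_card_le _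
    have h2 : ((parents.map Prod.fst).dedup).length ≤ parents.length := by
      have := (List.dedup_sublist (parents.map Prod.fst)).length_le
      simpa using this
    omega
  rw [List.Nodup, List.pairwise_iff_getElem] at hnd
  push Not at hnd
  obtain ⟨i, j, hi, hj, hij, heq⟩ := hnd
  rw [List.getElem_take, List.getElem_take] at heq
  have hi2 : i < parents.length + 1 := by omega
  have hj2 : j < parents.length + 1 := by omega
  have hk1 : vs[i]'(by omega) ∈ pvIter parents i (pvNxt parents node) :=
    pv_chain_getElem_iter parents vs hch h (pvNxt parents node) hhead hhL i (by omega)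
  have hk2 : vs[i + (j - i)]'(by omega) ∈ pvIter parents (j - i) [vs[i]'(by omega)] :=
    pv_chain_shift parents vs hch i (j - i) (by omega)
  have hidx : i + (j - i) = j := by omega
  have hcy : vs[i]'(by omega) ∈ pvIter parents (j - i) [vs[i]'(by omega)] := by
    simp only [hidx] at hk2
    rwa [← heq] at hk2
  have hmem1 : vs[i]'(by omega) ∈ pvReach parents (parents.length + 1) (pvNxt parents node) :=
    (pv_mem_reach parents _ _ _).mpr ⟨i, by omega, hk1⟩
  have hstep1 : pvStep parents [vs[i]'(by omega)] = pvNxt parents (vs[i]'(by omega)) := by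
    simp [pvStep]
  have hcy' : vs[i]'(by omega) ∈ pvIter parents (j - i - 1) (pvNxt parents (vs[i]'(by omega))) := by
    have hji : j - i = (j - i - 1) + 1 := by omega
    rw [hji, pv_iter_succ_inner, hstep1] at hcy
    exact hcy
  have hmem2 : vs[i]'(by omega) ∈ pvReach parents (parents.length + 1) (pvNxt parents (vs[i]'(by omega))) :=
    (pv_mem_reach parents _ _ _).mpr ⟨j - i - 1, by omega, hcy'⟩
  exact hpre node hn (vs[i]'(by omega)) hmem1 hmem2

lemma pv_queue_nil (parents : List (String × List String)) (f : Nat) :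
    pvQueue parents f [] = [] := by cases f <;> rfl

lemma pv_queue_flush (parents : List (String × List String)) :
    ∀ (q r : List String) (f : Nat),
      pvQueue parents (q.length + f) (q ++ r) = q ++ pvQueue parents f (r ++ pvStep parents q)
  | [], r, f => by simp [pvStep]
  | x :: q', r, f => by
      have h1 : (x :: q').length + f = (q'.length + f) + 1 := by simp [List.length_cons]; omega
      rw [h1]
      show x :: pvQueue parents (q'.length + f) ((q' ++ r) ++ pvNxt parents x) = _
      rw [List.append_assoc, pv_queue_flush parents q' (r ++ pvNxt parents x) f]
      simp [pvStep, List.append_assoc]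

def pvTotal (parents : List (String × List String)) : Nat → List String → Nat
  | 0, _ => 0
  | d + 1, L => L.length + pvTotal parents d (pvStep parents L)

-- the BFS queue, given ≥ pvTotal fuel, pops exactly the level concatenation
lemma pv_queue_eq_levels (parents : List (String × List String)) :
    ∀ (d : Nat) (L : List String), pvIter parents d L = [] →
      ∀ (f : Nat), pvQueue parents (pvTotal parents d L + f) L = pvLevels parents d L
  | 0, L, h, f => by
      have : L = [] := h
      subst this
      simpa [pvTotal, pvLevels] using pv_queue_nil parents f
  | d + 1, L, h, f => by
      by_cases hL : L = []
      · subst hL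
        simpa [pvLevels] using pv_queue_nil parents _
      · have h' : pvIter parents d (pvStep parents L) = [] := by
          rw [← pv_iter_succ_inner]; exact h
        have e1 : pvTotal parents (d + 1) L + f
            = L.length + (pvTotal parents d (pvStep parents L) + f) := by
          show L.length + pvTotal parents d (pvStep parents L) + f = _; omega
        rw [e1]
        have := pv_queue_flush parents L [] (pvTotal parents d (pvStep parents L) + f)
        rw [List.append_nil] at this
        rw [this, List.nil_append,
          pv_queue_eq_levels parents d (pvStep parents L) h' f]
        simp [pvLevels, hL]

lemma pv_nxt_len (parents : List (String × List String)) (x : String) :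
    (pvNxt parents x).length ≤ pvD parents := by
  unfold pvNxt
  cases h : (PySem.Dict.mk parents).get? x with
  | none => simp
  | some v =>
      have hv : (x, v) ∈ (PySem.Dict.mk parents).items := PySem.Dict.mem_items_of_get?_eq_some _ h
      have hv' : (x, v) ∈ parents := hv
      have hmem : v.length ∈ parents.map (fun p => p.2.length) :=
        List.mem_map.mpr ⟨(x, v), hv', rfl⟩
      simpa [pvD] using List.le_sum_of_mem hmem

lemma pv_step_len (parents : List (String × List String)) (L : List String) :
    (pvStep parents L).length ≤ L.length * pvD parents := by
  unfold pvStep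
  rw [List.length_flatMap]
  have := List.sum_le_card_nsmul (L.map (fun a => (pvNxt parents a).length)) (pvD parents)
    (by intro x hx; obtain ⟨a, _, rfl⟩ := List.mem_map.mp hx; exact pv_nxt_len parents a)
  simpa [List.length_map] using this

lemma pv_total_le (parents : List (String × List String)) :
    ∀ (d : Nat) (L : List String), pvTotal parents d L ≤ L.length * (pvD parents + 1) ^ d
  | 0, L => by simp [pvTotal]
  | d + 1, L => by
      have ih := pv_total_le parents d (pvStep parents L)
      have hs := pv_step_len parents L
      have hp : 1 ≤ (pvD parents + 1) ^ d := Nat.one_le_pow _ _ (by omega)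
      have h1 : pvTotal parents d (pvStep parents L)
          ≤ L.length * pvD parents * (pvD parents + 1) ^ d :=
        le_trans ih (Nat.mul_le_mul_right _ hs)
      have h2 : (pvD parents + 1) ^ (d + 1)
          = (pvD parents + 1) ^ d + pvD parents * (pvD parents + 1) ^ d := by ring
      show L.length + pvTotal parents d (pvStep parents L) ≤ L.length * (pvD parents + 1) ^ (d + 1)
      calc L.length + pvTotal parents d (pvStep parents L)
          ≤ L.length + L.length * pvD parents * (pvD parents + 1) ^ d := by omega
        _ ≤ L.length * (pvD parents + 1) ^ d + L.length * (pvD parents * (pvD parents + 1) ^ d) := by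
            have : L.length * 1 ≤ L.length * (pvD parents + 1) ^ d := Nat.mul_le_mul_left _ hp
            simp only [Nat.mul_one] at this
            have e : L.length * pvD parents * (pvD parents + 1) ^ d
                = L.length * (pvD parents * (pvD parents + 1) ^ d) := by ring
            omega
        _ = L.length * (pvD parents + 1) ^ (d + 1) := by rw [h2]; ring

lemma pv_node_eq (nodes : List String) (parents : List (String × List String))
    (hpre : Pre_get_ancestors_go nodes parents) {node : String} (hn : node ∈ nodes) :
    pvLevels parents (parents.length + 1) (pvNxt parents node)
      = pvQueue parents (pvFuelB parents) (pvNxt parents node) := by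
  have hterm := pv_term' nodes parents hpre hn
  have hle : pvTotal parents (parents.length + 1) (pvNxt parents node) ≤ pvFuelB parents := by
    calc pvTotal parents (parents.length + 1) (pvNxt parents node)
        ≤ (pvNxt parents node).length * (pvD parents + 1) ^ (parents.length + 1) :=
          pv_total_le parents _ _
      _ ≤ pvD parents * (pvD parents + 1) ^ (parents.length + 1) :=
          Nat.mul_le_mul_right _ (pv_nxt_len parents node)
      _ = pvFuelB parents := rfl
  have h := pv_queue_eq_levels parents (parents.length + 1) (pvNxt parents node) hterm
    (pvFuelB parents - pvTotal parents (parents.length + 1) (pvNxt parents node))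
  rw [Nat.add_sub_cancel' hle] at h
  exact h.symm

-- ===== VERDICT (by name: the statement is the Claim_ definition above) =====
theorem get_ancestors_go_spec : Claim_equal_get_ancestors_go := by
  intro nodes parents _hdom hpre
  unfold Spec_get_ancestors_go get_ancestors_go get_ancestors_go_alt
  congr 1
  apply PySem.List.foldl_congr_mem
  intro acc node hn
  show PySem.Dict.insert acc node
      (pvLevels parents (parents.length + 1) (((PySem.Dict.mk parents).get? node).getD [])) = _
  congr 1
  exact pv_node_eq nodes parents hpre hn
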